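-- pv_equiv track=rewrite | github.com/noelgarber/PACM | Motif_Predictor/motif_topology_predictor.py | protein_type_assigner
-- ===== SOURCE A (Python) =====
-- def protein_type_assigner(dict_of_features):
--     '''
--     Function that returns combined protein type; must be passed in a loop when multiple TMDs could be present
--
--     Args:
--         dict_of_features (dict): dictionary of features
--
--     Returns:
--         combined_protein_type (str): one of "Transmembrane", "Intermembrane", "Transmembrane/Intermembrane", or ""
--     '''
--
--     combined_protein_type = ""
--     if dict_of_features is not None:
--         for feature_dict in dict_of_features:
--             feature_type = feature_dict.get("type")
--             if feature_type in ["Transmembrane", "Intramembrane"]: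
--                 if combined_protein_type == "":
--                     combined_protein_type = feature_type # Sets protein type to either Transmembrane or Intramembrane
--                 elif combined_protein_type == "Transmembrane" and feature_type == "Intramembrane":
--                     combined_protein_type = "Transmembrane/Intramembrane"
--                 elif combined_protein_type == "Intramembrane" and feature_type == "Transmembrane":
--                     combined_protein_type = "Transmembrane/Intramembrane"
--
--     return combined_protein_type
-- ===== SOURCE B (Python) =====
-- def protein_type_assigner(dict_of_features):
--     types = [fd.get("type") for fd in (dict_of_features if dict_of_features is not None else [])]
--     return "/".join(t for t in ("Transmembrane", "Intramembrane") if t in types)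
-- ===== Notes on version B (the rewrite author's own statement) =====
-- stated objective: simpler
-- what changed: B replaces A's stateful branch-cascade loop with two staged passes: extract all feature types, filter the fixed ordered tuple of membrane types by membership, and '/'.join the result.
import Mathlib
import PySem

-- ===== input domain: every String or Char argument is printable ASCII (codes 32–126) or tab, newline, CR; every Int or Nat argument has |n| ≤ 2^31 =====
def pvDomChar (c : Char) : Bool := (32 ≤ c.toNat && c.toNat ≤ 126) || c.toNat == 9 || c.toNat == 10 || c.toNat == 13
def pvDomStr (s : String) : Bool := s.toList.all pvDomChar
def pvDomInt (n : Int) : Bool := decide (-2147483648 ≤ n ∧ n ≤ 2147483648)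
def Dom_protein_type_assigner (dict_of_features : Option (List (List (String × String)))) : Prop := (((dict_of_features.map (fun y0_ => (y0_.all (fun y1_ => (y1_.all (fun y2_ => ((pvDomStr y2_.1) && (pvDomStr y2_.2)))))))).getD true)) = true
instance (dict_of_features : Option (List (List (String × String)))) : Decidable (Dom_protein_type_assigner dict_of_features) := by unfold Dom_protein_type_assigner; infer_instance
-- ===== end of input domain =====

-- B replaces A's stateful branch-cascade loop with staged passes: extract the
-- feature types, filter the fixed ordered pair of membrane types by membership,
-- and join with "/" (objective: simpler).

-- ===== PORT A =====
-- A's loop body: update the combined string for one feature dict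
def ptaStepA (acc : String) (fd : List (String × String)) : String :=
  let ft := (PySem.Dict.ofList fd).get? "type"
  if ft = some "Transmembrane" ∨ ft = some "Intramembrane" then
    if acc = "" then ft.getD ""
    else if acc = "Transmembrane" ∧ ft = some "Intramembrane" then "Transmembrane/Intramembrane"
    else if acc = "Intramembrane" ∧ ft = some "Transmembrane" then "Transmembrane/Intramembrane"
    else acc
  else acc

def protein_type_assigner (dict_of_features : Option (List (List (String × String)))) : String :=
  match dict_of_features with
  | none => ""
  | some l => l.foldl ptaStepA ""

-- ===== PORT B =====
def protein_type_assigner_alt (dict_of_features : Option (List (List (String × String)))) : String :=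
  let types :=
    (match dict_of_features with
     | none => []
     | some l => l).map (fun fd => (PySem.Dict.ofList fd).get? "type")
  PySem.Str.join "/"
    ((["Transmembrane", "Intramembrane"] : List String).filter
      (fun t => types.contains (some t)))

-- ===== PRECONDITION & SPEC =====
def Spec_protein_type_assigner (dict_of_features : Option (List (List (String × String)))) (out : String) : Prop := out = protein_type_assigner_alt dict_of_features
instance (dict_of_features : Option (List (List (String × String)))) (out : String) : Decidable (Spec_protein_type_assigner dict_of_features out) := by unfold Spec_protein_type_assigner; infer_instance

-- ===== CLAIM =====
def Claim_equal_protein_type_assigner : Prop := ∀ (dict_of_features : Option (List (List (String × String)))), Dom_protein_type_assigner dict_of_features → Spec_protein_type_assigner dict_of_features (protein_type_assigner dict_of_features)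

-- ===== LEMMAS AND PROOFS =====

-- decode a pair of presence flags into the string A accumulates
def ptaDec (a b : Bool) : String :=
  if a then (if b then "Transmembrane/Intramembrane" else "Transmembrane")
  else (if b then "Intramembrane" else "")

theorem ptaStep_dec (fd : List (String × String)) (a b : Bool) :
    ptaStepA (ptaDec a b) fd =
      ptaDec (a || ((PySem.Dict.ofList fd).get? "type" == some "Transmembrane"))
             (b || ((PySem.Dict.ofList fd).get? "type" == some "Intramembrane")) := by
  by_cases hT : (PySem.Dict.ofList fd).get? "type" = some "Transmembrane" <;>
    by_cases hI : (PySem.Dict.ofList fd).get? "type" = some "Intramembrane" <;>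
      cases a <;> cases b <;>
        simp_all [ptaStepA, ptaDec]

theorem ptaFold_dec (l : List (List (String × String))) (a b : Bool) :
    l.foldl ptaStepA (ptaDec a b) =
      ptaDec (a || (l.map (fun fd => (PySem.Dict.ofList fd).get? "type")).contains (some "Transmembrane"))
             (b || (l.map (fun fd => (PySem.Dict.ofList fd).get? "type")).contains (some "Intramembrane")) := by
  induction l generalizing a b with
  | nil => simp
  | cons fd t ih =>
      simp only [List.foldl_cons, ptaStep_dec, List.map_cons, List.contains_cons]
      rw [ih]
      congr 1
      · cases a <;> simp [BEq.comm]
      · cases b <;> simp [BEq.comm]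

-- ===== VERDICT =====
theorem protein_type_assigner_spec : Claim_equal_protein_type_assigner := by
  intro d _
  unfold Spec_protein_type_assigner protein_type_assigner protein_type_assigner_alt
  cases d with
  | none => rfl
  | some l =>
      have h := ptaFold_dec l false false
      simp only [Bool.false_or, ptaDec, Bool.false_eq_true, ite_false] at h
      simp only []
      rw [show ("" : String) = ptaDec false false from rfl, ptaFold_dec l false false]
      simp only [Bool.false_or]
      rcases hT : (l.map (fun fd => (PySem.Dict.ofList fd).get? "type")).contains (some "Transmembrane") <;>
        rcases hI : (l.map (fun fd => (PySem.Dict.ofList fd).get? "type")).contains (some "Intramembrane") <;>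
          simp only [ptaDec, hT, hI, List.filter_cons, List.filter_nil,
            Bool.false_eq_true, ite_false, ite_true] <;> rfl
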